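-- pv_equiv track=rewrite | github.com/a1da4/leetcode | submissions/1894_Find_the_Student_that_Will_Replace_the_Chalk_solution2.py | chalkReplacer
-- ===== SOURCE A (Python) =====
-- from typing import List
--
-- def chalkReplacer(chalk: List[int], k: int) -> int:
--     curr = k % sum(chalk)
--     left, right = 0, len(chalk) - 1
--
--     while left < right:
--         mid = (left + right) // 2
--         if sum(chalk[:mid + 1]) <= curr:
--             left = mid + 1
--         else:
--             right = mid
--
--     return left
-- ===== SOURCE B (Python) =====
-- from typing import List
--
-- def chalkReplacer(chalk: List[int], k: int) -> int:
--     # build the running prefix sums once, instead of re-summing a slice per probe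
--     prefix = []
--     total = 0
--     for c in chalk:
--         total += c
--         prefix.append(total)
--     curr = k % total
--     def bisect(lo: int, hi: int) -> int:
--         if lo >= hi:
--             return lo
--         mid = (lo + hi) // 2
--         if prefix[mid] <= curr:
--             return bisect(mid + 1, hi)
--         return bisect(lo, mid)
--     return bisect(0, len(chalk) - 1)
-- ===== Notes on version B (the rewrite author's own statement) =====
-- stated objective: alternative
-- what changed: B builds the running prefix-sum array in one pass and then bisects recursively over it by indexing, where A's while-loop re-sums the slice chalk[:mid+1] at every probe; B does O(n) arithmetic vs A's O(n log n), but A's slice-sums run in C so a timing run shows no win.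
import Mathlib
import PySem

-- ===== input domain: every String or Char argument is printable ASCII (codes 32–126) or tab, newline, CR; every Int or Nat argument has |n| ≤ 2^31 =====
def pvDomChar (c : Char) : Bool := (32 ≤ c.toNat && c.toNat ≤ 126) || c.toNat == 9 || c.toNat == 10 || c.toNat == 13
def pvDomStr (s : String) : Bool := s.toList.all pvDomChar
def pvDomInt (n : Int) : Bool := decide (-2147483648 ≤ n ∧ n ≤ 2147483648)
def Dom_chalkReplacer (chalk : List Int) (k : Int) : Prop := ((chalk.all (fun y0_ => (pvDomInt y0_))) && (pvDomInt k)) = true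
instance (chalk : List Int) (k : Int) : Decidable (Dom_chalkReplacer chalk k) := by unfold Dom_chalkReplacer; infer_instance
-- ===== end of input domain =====

-- B precomputes the prefix-sum array once and bisects recursively over it by indexing,
-- instead of A's while-loop that re-sums the slice chalk[:mid+1] at every probe.

-- ===== PORT A =====
-- while left < right: mid = (left+right)//2; if sum(chalk[:mid+1]) <= curr: left = mid+1 else right = mid
-- (fuel is a totality guard only: right - left shrinks every iteration, so fuel = (right-left)+1 never runs out)
def chalkLoopA (chalk : List Int) (curr : Int) : Nat → Int → Int → Int
  | 0, left, _ => left
  | fuel + 1, left, right =>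
    if left < right then
      let mid := PySem.Int.floordiv (left + right) 2
      if (PySem.List.slice chalk none (some (mid + 1))).sum ≤ curr then
        chalkLoopA chalk curr fuel (mid + 1) right
      else
        chalkLoopA chalk curr fuel left mid
    else left

def chalkReplacer (chalk : List Int) (k : Int) : Int :=
  let curr := PySem.Int.mod k chalk.sum
  chalkLoopA chalk curr ((((chalk.length : Int) - 1) - 0).toNat + 1) 0 ((chalk.length : Int) - 1)

-- ===== PORT B =====
-- the for-loop 'total += c; prefix.append(total)': returns (prefix, total)
def chalkAcc : List Int → Int → List Int × Int
  | [], total => ([], total)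
  | c :: rest, total =>
      let r := chalkAcc rest (total + c)
      ((total + c) :: r.1, r.2)

-- def bisect(lo, hi): if lo >= hi: return lo; mid = (lo+hi)//2; recurse on the half that keeps the boundary
-- (pfx[mid] read with pyGet?; the .getD default 0 is never reached: 0 ≤ mid < len(pfx) at every call;
--  fuel is a totality guard only: hi - lo shrinks at every recursive call)
def chalkBisect (pfx : List Int) (curr : Int) : Nat → Int → Int → Int
  | 0, lo, _ => lo
  | fuel + 1, lo, hi =>
    if lo ≥ hi then lo
    else
      let mid := PySem.Int.floordiv (lo + hi) 2
      if (PySem.List.pyGet? pfx mid).getD 0 ≤ curr then chalkBisect pfx curr fuel (mid + 1) hi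
      else chalkBisect pfx curr fuel lo mid

def chalkReplacer_alt (chalk : List Int) (k : Int) : Int :=
  let acc := chalkAcc chalk 0
  let curr := PySem.Int.mod k acc.2
  chalkBisect acc.1 curr ((((chalk.length : Int) - 1) - 0).toNat + 1) 0 ((chalk.length : Int) - 1)

-- ===== PRECONDITION & SPEC =====
-- Pre_ excludes exactly the inputs with sum(chalk) = 0 (including the empty list), on which
-- the Python A raises ZeroDivisionError at 'k % sum(chalk)'.
def Pre_chalkReplacer (chalk : List Int) (k : Int) : Prop := chalk.sum ≠ 0
instance (chalk : List Int) (k : Int) : Decidable (Pre_chalkReplacer chalk k) := by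
  unfold Pre_chalkReplacer; infer_instance

def pvWitness_chalkReplacer : List Int × Int := ([3, 4, 1, 2], 25)

def Spec_chalkReplacer (chalk : List Int) (k : Int) (out : Int) : Prop := out = chalkReplacer_alt chalk k
instance (chalk : List Int) (k : Int) (out : Int) : Decidable (Spec_chalkReplacer chalk k out) := by unfold Spec_chalkReplacer; infer_instance

-- ===== CLAIM (what is proved, stated in full; the proofs are below) =====
def Claim_equal_chalkReplacer : Prop := ∀ (chalk : List Int) (k : Int), Dom_chalkReplacer chalk k → Pre_chalkReplacer chalk k → Spec_chalkReplacer chalk k (chalkReplacer chalk k)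

-- ===== LEMMAS AND PROOFS =====

-- the accumulator returns the total sum
theorem chalkAcc_snd (l : List Int) : ∀ t : Int, (chalkAcc l t).2 = t + l.sum := by
  induction l with
  | nil => intro t; simp [chalkAcc]
  | cons c rest ih => intro t; simp [chalkAcc, ih (t + c)]; ring

-- entry m of the accumulator's list is t + sum of the first m+1 elements
theorem chalkAcc_getElem? (l : List Int) : ∀ (t : Int) (m : Nat), m < l.length →
    (chalkAcc l t).1[m]? = some (t + (l.take (m + 1)).sum) := by
  induction l with
  | nil => intro _ m hm; simp at hm
  | cons c rest ih =>
    intro t m hm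
    cases m with
    | zero => simp [chalkAcc]
    | succ m' =>
      have := ih (t + c) m' (by simpa using Nat.lt_of_succ_lt_succ hm)
      simp [chalkAcc, List.take_succ_cons, this]
      ring

-- the two searches run in lock-step: A re-sums the slice, B reads the prefix array
theorem loops_eq (chalk : List Int) (curr : Int) :
    ∀ (fuel : Nat) (lo hi : Int), 0 ≤ lo → hi ≤ (chalk.length : Int) - 1 →
      chalkLoopA chalk curr fuel lo hi = chalkBisect (chalkAcc chalk 0).1 curr fuel lo hi := by
  intro fuel
  induction fuel with
  | zero => intro lo hi _ _; rfl
  | succ fuel ih =>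
    intro lo hi hl0 hhi
    by_cases h : lo < hi
    · have hb := PySem.Int.floordiv_two_mid_bounds (le_of_lt h)
      rw [chalkLoopA, chalkBisect]
      rw [if_pos h, if_neg (by omega : ¬ lo ≥ hi)]
      set mid := PySem.Int.floordiv (lo + hi) 2 with hmid
      have hmid0 : (0:Int) ≤ mid := by omega
      have hmlen : mid.toNat < chalk.length := by omega
      have hget : PySem.List.pyGet? (chalkAcc chalk 0).1 mid
          = some ((chalk.take (mid.toNat + 1)).sum) := by
        rw [PySem.List.pyGet?_of_nonneg _ hmid0,
            chalkAcc_getElem? chalk 0 mid.toNat (by omega)]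
        simp
      have hslice : PySem.List.slice chalk none (some (mid + 1)) = chalk.take (mid.toNat + 1) := by
        rw [PySem.List.slice_to chalk (by omega : (0:Int) ≤ mid + 1)]
        congr 1
        omega
      simp only [hget, hslice, Option.getD_some]
      by_cases hcmp : (chalk.take (mid.toNat + 1)).sum ≤ curr
      · rw [if_pos hcmp, if_pos hcmp]
        exact ih (mid + 1) hi (by omega) hhi
      · rw [if_neg hcmp, if_neg hcmp]
        exact ih lo mid hl0 (by omega)
    · rw [chalkLoopA, chalkBisect, if_neg h, if_pos (by omega : lo ≥ hi)]

-- ===== VERDICT (by name: the statement is the Claim_ definition above) =====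
theorem chalkReplacer_spec : Claim_equal_chalkReplacer := by
  intro chalk k _ _
  unfold Spec_chalkReplacer chalkReplacer chalkReplacer_alt
  have htot : (chalkAcc chalk 0).2 = chalk.sum := by
    rw [chalkAcc_snd]; ring
  simp only [htot]
  exact loops_eq chalk (PySem.Int.mod k chalk.sum) _ 0 ((chalk.length : Int) - 1)
    le_rfl le_rfl
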